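-- pv_equiv track=rewrite | github.com/ysilo/sandbox | openclaw-trading-bot/src/signals/strategy_selector.py | _filter_exclusive
-- ===== SOURCE A (Python) =====
-- _EXCLUSIVE_PAIRS: tuple[tuple[str, str], ...] = (
--     ("mean_reversion", "breakout_momentum"),
-- )
--
-- def _filter_exclusive(strategies: list[str]) -> list[str]:
--     """Retire les conflits mutuellement exclusifs (§6.9).
--
--     Si les deux membres d'une paire exclusive sont présents, on garde le premier
--     rencontré dans la liste d'entrée (qui reflète l'ordre de priorité du régime).
--     """
--     kept: list[str] = []
--     banned: set[str] = set()
--     for s in strategies: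
--         if s in banned:
--             continue
--         kept.append(s)
--         for a, b in _EXCLUSIVE_PAIRS:
--             if s == a:
--                 banned.add(b)
--             elif s == b:
--                 banned.add(a)
--     return kept
-- ===== SOURCE B (Python) =====
-- _EXCLUSIVE_PAIRS: tuple[tuple[str, str], ...] = (
--     ("mean_reversion", "breakout_momentum"),
-- )
--
-- def _filter_exclusive(strategies: list[str]) -> list[str]:
--     """Conflict table first, then one plain filter pass.
--
--     For each exclusive pair whose two members both occur, the member whose
--     first occurrence comes later is put in `removed`; the result is a single
--     filter keeping everything not removed.
--     """
--     removed: set[str] = set()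
--     for a, b in _EXCLUSIVE_PAIRS:
--         if a in strategies and b in strategies:
--             removed.add(b if strategies.index(a) < strategies.index(b) else a)
--     return [s for s in strategies if s not in removed]
-- ===== Notes on version B (the rewrite author's own statement) =====
-- stated objective: alternative
-- what changed: B precomputes a removal set per exclusive pair from first-occurrence indices and then returns a single filter pass, instead of A's ban-as-you-go loop with a growing banned set checked at every element.
import Mathlib
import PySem

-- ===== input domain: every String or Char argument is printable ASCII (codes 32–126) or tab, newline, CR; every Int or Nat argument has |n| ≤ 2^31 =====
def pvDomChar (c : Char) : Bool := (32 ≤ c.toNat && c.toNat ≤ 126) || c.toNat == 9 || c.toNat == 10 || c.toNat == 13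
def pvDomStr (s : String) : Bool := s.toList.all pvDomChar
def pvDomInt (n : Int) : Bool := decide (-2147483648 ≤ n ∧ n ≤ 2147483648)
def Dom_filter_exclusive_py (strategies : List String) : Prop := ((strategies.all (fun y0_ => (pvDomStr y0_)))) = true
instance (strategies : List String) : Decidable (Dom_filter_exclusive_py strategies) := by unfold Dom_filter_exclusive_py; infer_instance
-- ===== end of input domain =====

-- B builds the removal set from first-occurrence indices and then filters once,
-- instead of A's ban-as-you-go single pass; same cost, different decomposition.

-- ===== PORT A =====
def pvPairs : List (String × String) := [("mean_reversion", "breakout_momentum")]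

def pvALoop : List String → List String → PySem.Set String → List String
  | [], kept, _ => kept
  | s :: rest, kept, banned =>
    if PySem.Set.contains banned s then
      pvALoop rest kept banned
    else
      pvALoop rest (kept ++ [s])
        (pvPairs.foldl (fun bn p =>
          if s == p.1 then PySem.Set.add bn p.2
          else if s == p.2 then PySem.Set.add bn p.1
          else bn) banned)

def filter_exclusive_py (strategies : List String) : List String :=
  pvALoop strategies [] PySem.Set.empty

-- ===== PORT B =====
def pvBRemoved (strategies : List String) : PySem.Set String :=
  pvPairs.foldl (fun removed p =>
    if strategies.contains p.1 && strategies.contains p.2 then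
      -- both indices exist under the guard; the none branch is a totality guard only
      match PySem.List.index? strategies p.1, PySem.List.index? strategies p.2 with
      | some i, some j => PySem.Set.add removed (if i < j then p.2 else p.1)
      | _, _ => removed
    else removed) PySem.Set.empty

def filter_exclusive_py_alt (strategies : List String) : List String :=
  strategies.filter (fun s => !(PySem.Set.contains (pvBRemoved strategies) s))

-- ===== PRECONDITION & SPEC =====
def Spec_filter_exclusive_py (strategies : List String) (out : List String) : Prop := out = filter_exclusive_py_alt strategies
instance (strategies : List String) (out : List String) : Decidable (Spec_filter_exclusive_py strategies out) := by unfold Spec_filter_exclusive_py; infer_instance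

-- ===== CLAIM (what is proved, stated in full; the proofs are below) =====
def Claim_equal_filter_exclusive_py : Prop := ∀ (strategies : List String), Dom_filter_exclusive_py strategies → Spec_filter_exclusive_py strategies (filter_exclusive_py strategies)

-- ===== LEMMAS AND PROOFS =====

lemma pvALoop_stable (rest : List String) (kept : List String) (banned : PySem.Set String)
    (h : "mean_reversion" ∈ banned ∨ "breakout_momentum" ∈ banned) :
    pvALoop rest kept banned = kept ++ rest.filter (fun s => !(PySem.Set.contains banned s)) := by
  induction rest generalizing kept with
  | nil => simp [pvALoop]
  | cons s rest ih =>
    by_cases hs : s ∈ banned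
    · simp [pvALoop, PySem.Set.contains, hs, ih]
    · have hadd : ∀ x, x ∈ banned → PySem.Set.add banned x = banned := by
        intro x hx; simp [PySem.Set.add, hx]
      by_cases hA : s = "mean_reversion"
      · subst hA
        have hb : "breakout_momentum" ∈ banned := h.resolve_left hs
        simp [pvALoop, PySem.Set.contains, hs, pvPairs, hadd _ hb, ih]
      · by_cases hB : s = "breakout_momentum"
        · subst hB
          have ha : "mean_reversion" ∈ banned := h.resolve_right hs
          simp [pvALoop, PySem.Set.contains, hs, pvPairs, hadd _ ha, ih]
        · simp [pvALoop, PySem.Set.contains, hs, pvPairs, hA, hB, ih]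

lemma pvBRemoved_consA (rest : List String) :
    pvBRemoved ("mean_reversion" :: rest)
      = if "breakout_momentum" ∈ rest then ["breakout_momentum"] else [] := by
  by_cases hb : "breakout_momentum" ∈ rest
  · obtain ⟨j, hj⟩ : ∃ j, PySem.List.index? rest "breakout_momentum" = some j := by
      rw [← Option.isSome_iff_exists, PySem.List.index?_isSome_iff]; exact hb
    rw [pvBRemoved]; simp only [pvPairs, List.foldl]
    rw [PySem.List.index?_cons_self, PySem.List.index?_cons_of_ne (x := "mean_reversion") (v := "breakout_momentum") rest (by decide), hj]
    simp [hb, PySem.Set.add, PySem.Set.empty]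
  · rw [pvBRemoved]
    simp [pvPairs, hb, PySem.Set.empty]

lemma pvBRemoved_consB (rest : List String) :
    pvBRemoved ("breakout_momentum" :: rest)
      = if "mean_reversion" ∈ rest then ["mean_reversion"] else [] := by
  by_cases ha : "mean_reversion" ∈ rest
  · obtain ⟨j, hj⟩ : ∃ j, PySem.List.index? rest "mean_reversion" = some j := by
      rw [← Option.isSome_iff_exists, PySem.List.index?_isSome_iff]; exact ha
    rw [pvBRemoved]; simp only [pvPairs, List.foldl]
    rw [PySem.List.index?_cons_of_ne (x := "breakout_momentum") (v := "mean_reversion") rest (by decide), PySem.List.index?_cons_self, hj]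
    simp [ha, PySem.Set.add, PySem.Set.empty]
  · rw [pvBRemoved]
    simp [pvPairs, ha, PySem.Set.empty]

lemma pvBRemoved_cons_other (s : String) (rest : List String)
    (hA : s ≠ "mean_reversion") (hB : s ≠ "breakout_momentum") :
    pvBRemoved (s :: rest) = pvBRemoved rest := by
  by_cases ha : "mean_reversion" ∈ rest
  · by_cases hb : "breakout_momentum" ∈ rest
    · obtain ⟨i, hi⟩ : ∃ i, PySem.List.index? rest "mean_reversion" = some i := by
        rw [← Option.isSome_iff_exists, PySem.List.index?_isSome_iff]; exact ha
      obtain ⟨j, hj⟩ : ∃ j, PySem.List.index? rest "breakout_momentum" = some j := by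
        rw [← Option.isSome_iff_exists, PySem.List.index?_isSome_iff]; exact hb
      rw [pvBRemoved, pvBRemoved]; simp only [pvPairs, List.foldl]
      rw [PySem.List.index?_cons_of_ne (v := "mean_reversion") rest hA, PySem.List.index?_cons_of_ne (v := "breakout_momentum") rest hB, hi, hj]
      have : (i + 1 < j + 1) = (i < j) := by simp
      simp [ha, hb, this]
    · rw [pvBRemoved, pvBRemoved]; simp [pvPairs, hb]
      exact fun _ h => absurd h.symm hB
  · rw [pvBRemoved, pvBRemoved]; simp [pvPairs, ha]
    exact fun h => absurd h.symm hA

lemma pvBRemoved_shape (l : List String) :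
    pvBRemoved l = [] ∨ pvBRemoved l = ["breakout_momentum"] ∨ pvBRemoved l = ["mean_reversion"] := by
  rw [pvBRemoved]; simp only [pvPairs, List.foldl]
  split_ifs with h
  · rcases hI : PySem.List.index? l "mean_reversion" with _ | i <;>
      rcases hJ : PySem.List.index? l "breakout_momentum" with _ | j <;>
      simp [PySem.Set.add, PySem.Set.empty]; omega
  · simp [PySem.Set.empty]

lemma pvALoop_empty (rest kept : List String) :
    pvALoop rest kept PySem.Set.empty
      = kept ++ rest.filter (fun s => !(PySem.Set.contains (pvBRemoved rest) s)) := by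
  induction rest generalizing kept with
  | nil => simp [pvALoop]
  | cons s rest ih =>
    rw [pvALoop, if_neg (by simp [PySem.Set.contains, PySem.Set.empty])]
    by_cases hA : s = "mean_reversion"
    · subst hA
      have hban : (pvPairs.foldl (fun bn p =>
          if ("mean_reversion" : String) == p.1 then PySem.Set.add bn p.2
          else if ("mean_reversion" : String) == p.2 then PySem.Set.add bn p.1
          else bn) PySem.Set.empty) = (["breakout_momentum"] : PySem.Set String) := by
        simp [pvPairs, PySem.Set.add, PySem.Set.empty]
      rw [hban, pvALoop_stable rest _ _ (Or.inr (by simp)), pvBRemoved_consA]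
      by_cases hb : "breakout_momentum" ∈ rest
      · simp [hb, PySem.Set.contains]
      · simp [hb, PySem.Set.contains]
        exact fun a ha e => hb (e ▸ ha)
    · by_cases hB : s = "breakout_momentum"
      · subst hB
        have hban : (pvPairs.foldl (fun bn p =>
            if ("breakout_momentum" : String) == p.1 then PySem.Set.add bn p.2
            else if ("breakout_momentum" : String) == p.2 then PySem.Set.add bn p.1
            else bn) PySem.Set.empty) = (["mean_reversion"] : PySem.Set String) := by
          simp [pvPairs, PySem.Set.add, PySem.Set.empty]
        rw [hban, pvALoop_stable rest _ _ (Or.inl (by simp)), pvBRemoved_consB]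
        by_cases ha : "mean_reversion" ∈ rest
        · simp [ha, PySem.Set.contains]
        · simp [ha, PySem.Set.contains]
          exact fun a haa e => ha (e ▸ haa)
      · have hban : (pvPairs.foldl (fun bn p =>
            if s == p.1 then PySem.Set.add bn p.2
            else if s == p.2 then PySem.Set.add bn p.1
            else bn) PySem.Set.empty) = (PySem.Set.empty : PySem.Set String) := by
          simp [pvPairs, hA, hB]
        rw [hban, ih, pvBRemoved_cons_other s rest hA hB]
        have hnot : PySem.Set.contains (pvBRemoved rest) s = false := by
          rcases pvBRemoved_shape rest with h | h | h <;>
            simp [h, PySem.Set.contains, hA, hB]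
        have hnot' : s ∉ pvBRemoved rest := by simpa [PySem.Set.contains] using hnot
        simp [hnot']

-- ===== VERDICT (by name: the statement is the Claim_ definition above) =====
theorem filter_exclusive_py_spec : Claim_equal_filter_exclusive_py := by
  intro strategies _
  show _ = _
  simpa [filter_exclusive_py, filter_exclusive_py_alt] using pvALoop_empty strategies []
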